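-- pv_equiv track=rewrite | github.com/jaganaramprasad/Language-Modeling | language.py | countStartWords
-- ===== SOURCE A (Python) =====
-- def countStartWords(corpus):
--     dicts={}
--     l=[]
--     for i in corpus:
--         l.append(i[0])
--     for item in l:
--         dicts[item]=l.count(item)
--     return dicts
-- ===== SOURCE B (Python) =====
-- def countStartWords(corpus):
--     # One pass with a running-count dict instead of list.count per element.
--     counts = {}
--     for s in corpus:
--         w = s[0]
--         counts[w] = counts.get(w, 0) + 1
--     return counts
-- ===== Notes on version B (the rewrite author's own statement) =====
-- stated objective: faster
-- what changed: Replaced the intermediate first-char list and the per-element list.count scan with a single pass that keeps a running count per key in the dict.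
import Mathlib
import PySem

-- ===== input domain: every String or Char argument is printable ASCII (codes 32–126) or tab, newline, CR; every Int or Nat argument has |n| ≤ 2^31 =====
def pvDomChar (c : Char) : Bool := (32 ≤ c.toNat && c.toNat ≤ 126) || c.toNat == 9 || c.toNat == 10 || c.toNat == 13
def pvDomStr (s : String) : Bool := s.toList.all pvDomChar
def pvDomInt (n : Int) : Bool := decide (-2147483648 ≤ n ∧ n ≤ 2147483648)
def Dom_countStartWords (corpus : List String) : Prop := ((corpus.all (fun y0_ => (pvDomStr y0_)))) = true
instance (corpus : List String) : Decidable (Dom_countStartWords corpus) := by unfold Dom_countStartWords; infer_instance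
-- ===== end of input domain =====

-- B is a single counting pass (running count per key) instead of A's list of first
-- characters plus a quadratic list.count per element; return value only.

-- ===== PORT A =====
-- i[0] of a Python str is a 1-character str; under Pre_ (no empty string) pyGet? is some.
def pvFirstA (s : String) : String :=
  ((PySem.Str.pyGet? s 0).map (fun c => String.ofList [c])).getD ""

def countStartWords (corpus : List String) : List (String × Int) :=
  let l : List String := corpus.foldl (fun acc i => acc ++ [pvFirstA i]) []
  let dicts : PySem.Dict String Int :=
    l.foldl (fun d item => d.insert item ((l.count item : Int))) PySem.Dict.empty
  dicts.items

-- ===== PORT B =====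
def pvFirstB (s : String) : String :=
  ((PySem.Str.pyGet? s 0).map (fun c => String.ofList [c])).getD ""

def countStartWords_alt (corpus : List String) : List (String × Int) :=
  (corpus.foldl
    (fun counts s =>
      let w := pvFirstB s
      counts.insert w (counts.getD w 0 + 1))
    PySem.Dict.empty).items

-- ===== PRECONDITION & SPEC =====
-- Pre_ excludes corpora containing an empty string: there A (and B) raise IndexError on i[0].
def Pre_countStartWords (corpus : List String) : Prop := ∀ s ∈ corpus, s ≠ ""
instance (corpus : List String) : Decidable (Pre_countStartWords corpus) := by
  unfold Pre_countStartWords; infer_instance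

def pvWitness_countStartWords : List String := ["the cat", "a dog", "the end"]

def Spec_countStartWords (corpus : List String) (out : List (String × Int)) : Prop :=
  out = countStartWords_alt corpus
instance (corpus : List String) (out : List (String × Int)) : Decidable (Spec_countStartWords corpus out) := by
  unfold Spec_countStartWords; infer_instance

-- ===== CLAIM =====
def Claim_equal_countStartWords : Prop :=
  ∀ (corpus : List String), Dom_countStartWords corpus → Pre_countStartWords corpus →
    Spec_countStartWords corpus (countStartWords corpus)

-- ===== LEMMAS AND PROOFS =====

-- A's first loop just maps pvFirstA over the corpus.
theorem foldl_append_first (corpus : List String) (acc : List String) :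
    corpus.foldl (fun acc i => acc ++ [pvFirstA i]) acc = acc ++ corpus.map pvFirstA := by
  induction corpus generalizing acc with
  | nil => simp
  | cons x xs ih => simp [List.foldl, ih]

-- insert-with-constant-value loop: getD at an untouched key.
theorem getD_foldl_insert_const_not_mem (f : String → Int) (l : List String)
    (d : PySem.Dict String Int) (k : String) (hk : k ∉ l) :
    (l.foldl (fun d x => d.insert x (f x)) d).getD k 0 = d.getD k 0 := by
  induction l generalizing d with
  | nil => rfl
  | cons x xs ih =>
    simp only [List.mem_cons, not_or] at hk
    simp [List.foldl, ih _ hk.2, PySem.Dict.getD_insert, hk.1]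

theorem getD_foldl_insert_const (f : String → Int) (l : List String)
    (d : PySem.Dict String Int) (k : String) (hk : k ∈ l) :
    (l.foldl (fun d x => d.insert x (f x)) d).getD k 0 = f k := by
  induction l generalizing d with
  | nil => cases hk
  | cons x xs ih =>
    by_cases h : k ∈ xs
    · simpa [List.foldl] using ih _ h
    · have hx : k = x := by rcases List.mem_cons.mp hk with h' | h'; exact h'; exact absurd h' h
      subst hx
      simp [List.foldl, getD_foldl_insert_const_not_mem f xs _ k h]

-- A's second loop builds exactly Counter(l).
theorem foldl_insert_count_eq_counter (l : List String) :
    l.foldl (fun d item => d.insert item ((l.count item : Int))) PySem.Dict.empty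
      = PySem.Dict.counter l := by
  apply PySem.Dict.ext
  have hnd : (l.foldl (fun d item => d.insert item ((l.count item : Int)))
      PySem.Dict.empty).keys.Nodup :=
    PySem.Dict.nodup_keys_foldl_insert l _ _ PySem.Dict.nodup_keys_empty
  have hk : (l.foldl (fun d item => d.insert item ((l.count item : Int)))
      PySem.Dict.empty).keys = PySem.Set.ofList l := by
    rw [PySem.Dict.keys_foldl_insert]
    simp [PySem.Dict.keys_empty, PySem.Set.update_nil_left]
  rw [PySem.Dict.items_eq_map_keys _ hnd 0, hk, PySem.Dict.items_counter]
  apply List.map_congr_left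
  intro k hkmem
  have : k ∈ l := (PySem.Set.mem_ofList l k).mp hkmem
  simp [getD_foldl_insert_const (fun x => (l.count x : Int)) l _ k this]

-- ===== VERDICT =====
theorem countStartWords_spec : Claim_equal_countStartWords := by
  intro corpus _ _
  unfold Spec_countStartWords
  dsimp only [countStartWords, countStartWords_alt]
  rw [foldl_append_first, List.nil_append, foldl_insert_count_eq_counter]
  have hB : (List.foldl
      (fun counts s => counts.insert (pvFirstB s) (counts.getD (pvFirstB s) 0 + 1))
      PySem.Dict.empty corpus) = PySem.Dict.counter (corpus.map pvFirstB) := by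
    rw [← PySem.Dict.foldl_insert_getD_add_one_eq_counter, List.foldl_map]
  rw [hB]
  rfl
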